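-- pv_equiv track=rewrite | github.com/OlehPalka/Econometrics_project | project.py | create_true_table
-- ===== SOURCE A (Python) =====
-- def create_true_table(data):
--     """
--     This function creates real table of laeders for the given year. (we can check in the internet)
--     """
--     real_table = {}
--     for team in data:
--         wins = 0
--         draws = 0
--         looses = 0
--         for val in data[team]:
--             if 'HomeTeam' in team:
--                 if val[1] == 'H':
--                     wins += 1
--                 elif val[1] == 'D':
--                     draws += 1
--                 elif val[1] == 'A':
--                     looses += 1
--             else:
--                 if val[1] == 'H':
--                     looses += 1
--                 elif val[1] == 'D':
--                     draws += 1
--                 elif val[1] == 'A':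
--                     wins += 1
--         if team[8:] not in real_table:
--             real_table[team[8:]] = [wins, draws, looses]
--         else:
--             real_table[team[8:]][0] += wins
--             real_table[team[8:]][1] += draws
--             real_table[team[8:]][2] += looses
--
--     for team in real_table:
--         real_table[team] = real_table[team][0] * 3 + real_table[team][1]
--
--     result = sorted(list(real_table.items()), key=lambda x: x[-1])
--     return result[::-1]
-- ===== SOURCE B (Python) =====
-- def create_true_table(data):
--     """Staged group-by: (1) flatten to per-dict-entry (key, points) contributions
--     using a points lookup table chosen by orientation, (2) list keys in first-seen
--     order, (3) sum each key's contributions, (4) sort ascending and reverse."""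
--     def score(team, matches):
--         table = {'H': 3, 'D': 1, 'A': 0} if 'HomeTeam' in team else {'A': 3, 'D': 1, 'H': 0}
--         return sum(table.get(r, 0) for _, r in matches)
--     contribs = [(team[8:], score(team, matches)) for team, matches in data.items()]
--     order = list(dict.fromkeys(k for k, _ in contribs))
--     items = [(k, sum(p for kk, p in contribs if kk == k)) for k in order]
--     return sorted(items, key=lambda x: x[-1])[::-1]
-- ===== Notes on version B (the rewrite author's own statement) =====
-- stated objective: alternative
-- what changed: B replaces A's mutable accumulator dict of wins/draws/losses triples (plus a second triple-to-points conversion loop) by a staged group-by: it flattens the input to a list of (key, points) contributions via a points lookup table, extracts the keys in first-seen order with dict.fromkeys, and computes each key's total by summing its contributions from that flat list; only the final sort-then-reverse is kept.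
import Mathlib
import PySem

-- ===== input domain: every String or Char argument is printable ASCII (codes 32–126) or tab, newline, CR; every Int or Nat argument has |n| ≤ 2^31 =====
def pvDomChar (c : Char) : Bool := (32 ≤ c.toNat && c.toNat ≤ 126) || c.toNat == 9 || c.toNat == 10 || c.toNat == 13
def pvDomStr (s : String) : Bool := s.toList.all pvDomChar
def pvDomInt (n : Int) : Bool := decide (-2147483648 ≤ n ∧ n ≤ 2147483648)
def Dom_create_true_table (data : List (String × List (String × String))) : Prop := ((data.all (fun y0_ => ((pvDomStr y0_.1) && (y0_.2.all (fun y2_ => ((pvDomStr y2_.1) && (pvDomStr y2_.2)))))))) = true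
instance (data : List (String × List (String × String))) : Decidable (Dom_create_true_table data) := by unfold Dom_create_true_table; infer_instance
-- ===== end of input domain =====

-- B: staged group-by (flat (key, points) contribution list via a lookup table, first-seen
-- key order, per-key sums) instead of A's accumulating W/D/L dict + conversion loop
-- (objective: alternative).


-- ===== PORT A =====
-- data : dict → PySem.Dict.ofList; 'real_table[k][i] += x' (in-place list mutation) is
-- insert with the updated triple (overwrite keeps position); the second Python loop
-- rebinds every key in order to an int, which (value type changes) is transliterated as
-- inserting the keys in the same order into a fresh dict; result[::-1] is reverse.
def create_true_table (data : List (String × List (String × String))) : List (String × Int) :=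
  let d := PySem.Dict.ofList data
  let real_table : PySem.Dict String (Int × Int × Int) :=
    d.items.foldl (fun rt p =>
      let team := p.1
      let wdl : Int × Int × Int :=
        p.2.foldl (fun (acc : Int × Int × Int) val =>
          if PySem.Str.isIn "HomeTeam" team then
            if val.2 == "H" then (acc.1 + 1, acc.2.1, acc.2.2)
            else if val.2 == "D" then (acc.1, acc.2.1 + 1, acc.2.2)
            else if val.2 == "A" then (acc.1, acc.2.1, acc.2.2 + 1)
            else acc
          else
            if val.2 == "H" then (acc.1, acc.2.1, acc.2.2 + 1)
            else if val.2 == "D" then (acc.1, acc.2.1 + 1, acc.2.2)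
            else if val.2 == "A" then (acc.1 + 1, acc.2.1, acc.2.2)
            else acc) (0, 0, 0)
      let key := String.ofList (PySem.List.slice team.toList (some 8) none)
      if rt.contains key = false then
        rt.insert key wdl
      else
        let t := rt.getD key (0, 0, 0)
        rt.insert key (t.1 + wdl.1, t.2.1 + wdl.2.1, t.2.2 + wdl.2.2)) PySem.Dict.empty
  let table2 : PySem.Dict String Int :=
    real_table.items.foldl (fun m p => m.insert p.1 (p.2.1 * 3 + p.2.2.1)) PySem.Dict.empty
  (PySem.List.sorted table2.items (fun x => x.2) false).reverse

-- ===== PORT B =====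
-- transliteration of Source B: helper 'score' with its points lookup table; the contribution
-- comprehension is map over the dict's items; list(dict.fromkeys(…)) is PySem.List.dedup;
-- the per-key-sum comprehension is map of filter-and-sum; result[::-1] is reverse.
def pvScore (team : String) (games : List (String × String)) : Int :=
  let table : PySem.Dict String Int :=
    if PySem.Str.isIn "HomeTeam" team then PySem.Dict.ofList [("H", 3), ("D", 1), ("A", 0)]
    else PySem.Dict.ofList [("A", 3), ("D", 1), ("H", 0)]
  (games.map (fun r => table.getD r.2 0)).sum

def create_true_table_alt (data : List (String × List (String × String))) : List (String × Int) :=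
  let contribs := (PySem.Dict.ofList data).items.map (fun p =>
    (String.ofList (PySem.List.slice p.1.toList (some 8) none), pvScore p.1 p.2))
  let order := PySem.List.dedup (contribs.map (fun c => c.1))
  let items := order.map (fun k =>
    (k, ((contribs.filter (fun c => c.1 == k)).map (fun c => c.2)).sum))
  (PySem.List.sorted items (fun x => x.2) false).reverse

-- ===== PRECONDITION & SPEC =====
def Spec_create_true_table (data : List (String × List (String × String))) (out : List (String × Int)) : Prop := out = create_true_table_alt data
instance (data : List (String × List (String × String))) (out : List (String × Int)) : Decidable (Spec_create_true_table data out) := by unfold Spec_create_true_table; infer_instance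

-- ===== CLAIM =====
def Claim_equal_create_true_table : Prop := ∀ (data : List (String × List (String × String))), Dom_create_true_table data → Spec_create_true_table data (create_true_table data)

-- ===== LEMMAS AND PROOFS =====

-- the linear map (w,d,l) ↦ 3w+d of A's second loop, and its action on dict items
def pvPhi (t : Int × Int × Int) : Int := t.1 * 3 + t.2.1
def pvPsi (p : String × (Int × Int × Int)) : String × Int := (p.1, pvPhi p.2)

-- A's accumulation step (definitionally its fold body)
def pvStepA (rt : PySem.Dict String (Int × Int × Int)) (p : String × List (String × String)) :
    PySem.Dict String (Int × Int × Int) :=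
  let team := p.1
  let wdl : Int × Int × Int :=
    p.2.foldl (fun (acc : Int × Int × Int) val =>
      if PySem.Str.isIn "HomeTeam" team then
        if val.2 == "H" then (acc.1 + 1, acc.2.1, acc.2.2)
        else if val.2 == "D" then (acc.1, acc.2.1 + 1, acc.2.2)
        else if val.2 == "A" then (acc.1, acc.2.1, acc.2.2 + 1)
        else acc
      else
        if val.2 == "H" then (acc.1, acc.2.1, acc.2.2 + 1)
        else if val.2 == "D" then (acc.1, acc.2.1 + 1, acc.2.2)
        else if val.2 == "A" then (acc.1 + 1, acc.2.1, acc.2.2)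
        else acc) (0, 0, 0)
  let key := String.ofList (PySem.List.slice team.toList (some 8) none)
  if rt.contains key = false then
    rt.insert key wdl
  else
    let t := rt.getD key (0, 0, 0)
    rt.insert key (t.1 + wdl.1, t.2.1 + wdl.2.1, t.2.2 + wdl.2.2)

-- intermediate point-accumulation step used to bridge A and B
def pvStepB (pts : PySem.Dict String Int) (p : String × List (String × String)) :
    PySem.Dict String Int :=
  let win : String := if PySem.Str.isIn "HomeTeam" p.1 then "H" else "A"
  let key := String.ofList (PySem.List.slice p.1.toList (some 8) none)
  let s : Int := (p.2.map (fun val =>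
    if val.2 == win then (3 : Int) else if val.2 == "D" then 1 else 0)).sum
  pts.insert key (pts.getD key 0 + s)

-- B's accumulation over the flat contribution list
def pvAcc (d : PySem.Dict String Int) (c : String × Int) : PySem.Dict String Int :=
  d.insert c.1 (d.getD c.1 0 + c.2)

-- per-key contribution sum
def pvS (l : List (String × Int)) (k : String) : Int :=
  ((l.filter (fun c => c.1 == k)).map (fun c => c.2)).sum

-- A's inner W/D/L fold, seen through pvPhi, is the per-match point sum
lemma pv_inner (team : String) (ms : List (String × String)) (acc : Int × Int × Int) :
    pvPhi (ms.foldl (fun (acc : Int × Int × Int) val =>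
          if PySem.Str.isIn "HomeTeam" team then
            if val.2 == "H" then (acc.1 + 1, acc.2.1, acc.2.2)
            else if val.2 == "D" then (acc.1, acc.2.1 + 1, acc.2.2)
            else if val.2 == "A" then (acc.1, acc.2.1, acc.2.2 + 1)
            else acc
          else
            if val.2 == "H" then (acc.1, acc.2.1, acc.2.2 + 1)
            else if val.2 == "D" then (acc.1, acc.2.1 + 1, acc.2.2)
            else if val.2 == "A" then (acc.1 + 1, acc.2.1, acc.2.2)
            else acc) acc)
      = pvPhi acc + (ms.map (fun val =>
          if val.2 == (if PySem.Str.isIn "HomeTeam" team then "H" else "A") then (3 : Int)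
          else if val.2 == "D" then 1 else 0)).sum := by
  cases hHome : PySem.Str.isIn "HomeTeam" team <;>
  · simp only [Bool.false_eq_true, if_true, if_false]
    induction ms generalizing acc with
    | nil => simp
    | cons v t ih =>
      simp only [List.foldl_cons, List.map_cons, List.sum_cons]
      rw [ih]
      split_ifs <;> simp_all [pvPhi] <;> ring

-- contains through the pvPsi image
lemma pv_contains (rt : PySem.Dict String (Int × Int × Int)) (pts : PySem.Dict String Int)
    (h : pts.items = rt.items.map pvPsi) (k : String) :
    pts.contains k = rt.contains k := by
  simp [PySem.Dict.contains, h, List.any_map, Function.comp_def, pvPsi]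

-- getD through the pvPsi image
lemma pv_getD (rt : PySem.Dict String (Int × Int × Int)) (pts : PySem.Dict String Int)
    (h : pts.items = rt.items.map pvPsi) (k : String) :
    pts.getD k 0 = pvPhi (rt.getD k (0, 0, 0)) := by
  have hfun : ((fun p : String × Int => p.1 == k) ∘ pvPsi) =
      (fun p : String × (Int × Int × Int) => p.1 == k) := by
    funext p; simp [pvPsi]
  simp only [PySem.Dict.getD, PySem.Dict.get?, h, List.find?_map, hfun]
  cases hf : rt.items.find? (fun p => p.1 == k) with
  | none => simp [pvPhi]
  | some p => simp [pvPsi]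

-- insert through the pvPsi image
lemma pv_insert (rt : PySem.Dict String (Int × Int × Int)) (pts : PySem.Dict String Int)
    (h : pts.items = rt.items.map pvPsi) (k : String) (v : Int × Int × Int) :
    (pts.insert k (pvPhi v)).items = ((rt.insert k v).items).map pvPsi := by
  rw [PySem.Dict.items_insert, PySem.Dict.items_insert, pv_contains rt pts h k]
  split_ifs with hc
  · rw [h, List.map_map, List.map_map]
    refine List.map_congr_left (fun p _ => ?_)
    by_cases hk : p.1 = k <;> simp [pvPsi, hk]
  · simp [h, pvPsi]

-- one accumulation step preserves the pvPsi relation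
lemma pv_step (rt : PySem.Dict String (Int × Int × Int)) (pts : PySem.Dict String Int)
    (h : pts.items = rt.items.map pvPsi) (p : String × List (String × String)) :
    (pvStepB pts p).items = (pvStepA rt p).items.map pvPsi := by
  have hsum := pv_inner p.1 p.2 (0, 0, 0)
  simp only [pvStepA, pvStepB]
  set key := String.ofList (PySem.List.slice p.1.toList (some 8) none) with hk
  rw [pv_getD rt pts h key]
  generalize hW : p.2.foldl (fun (acc : Int × Int × Int) val =>
      if PySem.Str.isIn "HomeTeam" p.1 then
        if val.2 == "H" then (acc.1 + 1, acc.2.1, acc.2.2)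
        else if val.2 == "D" then (acc.1, acc.2.1 + 1, acc.2.2)
        else if val.2 == "A" then (acc.1, acc.2.1, acc.2.2 + 1)
        else acc
      else
        if val.2 == "H" then (acc.1, acc.2.1, acc.2.2 + 1)
        else if val.2 == "D" then (acc.1, acc.2.1 + 1, acc.2.2)
        else if val.2 == "A" then (acc.1 + 1, acc.2.1, acc.2.2)
        else acc) (0, 0, 0) = wdl at hsum ⊢
  rw [show pvPhi ((0 : Int), (0 : Int), (0 : Int)) = 0 from rfl, zero_add] at hsum
  rw [← hsum]
  by_cases hc : rt.contains key = false
  · rw [if_pos hc, PySem.Dict.getD_of_not_contains _ _ hc]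
    rw [show pvPhi ((0 : Int), (0 : Int), (0 : Int)) + pvPhi wdl = pvPhi wdl from by
      simp [pvPhi]]
    exact pv_insert rt pts h key wdl
  · rw [if_neg hc]
    rw [show pvPhi (rt.getD key (0, 0, 0)) + pvPhi wdl
        = pvPhi ((rt.getD key (0, 0, 0)).1 + wdl.1, (rt.getD key (0, 0, 0)).2.1 + wdl.2.1,
            (rt.getD key (0, 0, 0)).2.2 + wdl.2.2) from by simp [pvPhi]; ring]
    exact pv_insert rt pts h key _

-- the two accumulation loops stay in the pvPsi relation
lemma pv_loop (l : List (String × List (String × String)))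
    (rt : PySem.Dict String (Int × Int × Int)) (pts : PySem.Dict String Int)
    (h : pts.items = rt.items.map pvPsi) :
    (l.foldl pvStepB pts).items = (l.foldl pvStepA rt).items.map pvPsi := by
  induction l generalizing rt pts with
  | nil => exact h
  | cons p l ih => exact ih _ _ (pv_step rt pts h p)

-- keys of A's accumulation dict stay Nodup
lemma pv_nodup (l : List (String × List (String × String)))
    (rt : PySem.Dict String (Int × Int × Int)) (h : rt.keys.Nodup) :
    (l.foldl pvStepA rt).keys.Nodup := by
  induction l generalizing rt with
  | nil => exact h
  | cons p l ih =>
    refine ih _ ?_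
    simp only [pvStepA]
    split_ifs <;> exact PySem.Dict.nodup_keys_insert _ _ _ h

-- B's point lookup table agrees with the if-chain scoring
lemma pv_score_eq (team : String) (ms : List (String × String)) :
    (ms.map (fun val =>
        if val.2 == (if PySem.Str.isIn "HomeTeam" team then "H" else "A") then (3 : Int)
        else if val.2 == "D" then 1 else 0)).sum = pvScore team ms := by
  unfold pvScore
  cases hHome : PySem.Str.isIn "HomeTeam" team <;>
  · simp only [Bool.false_eq_true, if_true, if_false]
    refine congrArg List.sum (List.map_congr_left (fun v _ => ?_))
    by_cases h1 : v.2 = "H"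
    · rw [h1]; decide
    by_cases h2 : v.2 = "D"
    · rw [h2]; decide
    by_cases h3 : v.2 = "A"
    · rw [h3]; decide
    simp [h1, h2, h3, Ne.symm h1, Ne.symm h2, Ne.symm h3,
      PySem.Dict.getD_eq_get?_getD, PySem.Dict.get?,
      PySem.Dict.ofList,
      show PySem.Dict.empty.update [("H", (3 : Int)), ("D", 1), ("A", 0)]
          = PySem.Dict.mk [("H", 3), ("D", 1), ("A", 0)] from by decide,
      show PySem.Dict.empty.update [("A", (3 : Int)), ("D", 1), ("H", 0)]
          = PySem.Dict.mk [("A", 3), ("D", 1), ("H", 0)] from by decide]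

-- the bridge step, restated over the flat contribution list
lemma pv_stepB_eq_acc (pts : PySem.Dict String Int) (p : String × List (String × String)) :
    pvStepB pts p
      = pvAcc pts (String.ofList (PySem.List.slice p.1.toList (some 8) none), pvScore p.1 p.2) := by
  simp only [pvStepB, pvAcc, pv_score_eq]

-- dedup over an appended element
lemma pv_dedup_append (xs : List String) (x : String) :
    PySem.List.dedup (xs ++ [x])
      = if x ∈ xs then PySem.List.dedup xs else PySem.List.dedup xs ++ [x] := by
  simp only [PySem.List.dedup_eq_ofList, PySem.Set.ofList_eq_foldl, List.foldl_append,
    List.foldl_cons, List.foldl_nil]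
  rw [show (PySem.Set.add (List.foldl PySem.Set.add [] xs) x)
      = if (List.foldl PySem.Set.add [] xs).contains x then List.foldl PySem.Set.add [] xs
        else List.foldl PySem.Set.add [] xs ++ [x] from rfl]
  have : (List.foldl PySem.Set.add [] xs).contains x = decide (x ∈ xs) := by
    rw [← PySem.Set.ofList_eq_foldl]
    simp [PySem.Set.mem_ofList]
  rw [this]
  by_cases h : x ∈ xs <;> simp [h]

-- per-key sums over an appended contribution
lemma pv_S_append (l : List (String × Int)) (c : String × Int) (k : String) :
    pvS (l ++ [c]) k = pvS l k + (if c.1 = k then c.2 else 0) := by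
  unfold pvS
  rw [List.filter_append]
  by_cases h : c.1 = k <;> simp [h]

lemma pv_S_of_not_mem (l : List (String × Int)) (k : String)
    (h : k ∉ l.map (fun c => c.1)) : pvS l k = 0 := by
  unfold pvS
  rw [List.filter_eq_nil_iff.mpr, List.map_nil, List.sum_nil]
  intro c hc hck
  exact h (List.mem_map.mpr ⟨c, hc, by simpa using hck⟩)

-- keys of the pvAcc fold are the deduped contribution keys
lemma pv_acc_keys (l : List (String × Int)) :
    (l.foldl pvAcc PySem.Dict.empty).keys = PySem.List.dedup (l.map (fun c => c.1)) := by
  have := PySem.Dict.keys_foldl_insert_key l (fun c : String × Int => c.1)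
    (fun d c => d.getD c.1 0 + c.2) PySem.Dict.empty
  simpa [pvAcc, PySem.List.dedup_eq_ofList, PySem.Set.ofList, PySem.Dict.keys_empty] using this

-- the accumulating dict IS the group-by of the flat contribution list
lemma pv_group (l : List (String × Int)) :
    (l.foldl pvAcc PySem.Dict.empty).items
      = (PySem.List.dedup (l.map (fun c => c.1))).map (fun k => (k, pvS l k)) := by
  induction l using List.reverseRecOn with
  | nil => rfl
  | append_singleton l c ih =>
    rw [List.foldl_append, List.foldl_cons, List.foldl_nil]
    have hkeys := pv_acc_keys l
    have hnod : (l.foldl pvAcc PySem.Dict.empty).keys.Nodup := by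
      rw [hkeys]; exact PySem.List.nodup_dedup _
    have hcont : (l.foldl pvAcc PySem.Dict.empty).contains c.1
        = decide (c.1 ∈ l.map (fun c => c.1)) := by
      rw [PySem.Dict.contains_eq_decide_mem_keys, hkeys]
      simp
    rw [List.map_append]
    simp only [List.map_cons, List.map_nil]
    rw [pv_dedup_append]
    by_cases hm : c.1 ∈ l.map (fun c => c.1)
    · -- overwrite in place
      have hcontT : (l.foldl pvAcc PySem.Dict.empty).contains c.1 = true := by
        rw [hcont]; simpa using hm
      have hmem : (c.1, pvS l c.1) ∈ (l.foldl pvAcc PySem.Dict.empty).items := by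
        rw [ih]
        exact List.mem_map.mpr ⟨c.1, by simpa using hm, rfl⟩
      have hgd : (l.foldl pvAcc PySem.Dict.empty).getD c.1 0 = pvS l c.1 :=
        PySem.Dict.getD_of_mem_items _ hmem hnod 0
      rw [show pvAcc (l.foldl pvAcc PySem.Dict.empty) c
          = (l.foldl pvAcc PySem.Dict.empty).insert c.1
              ((l.foldl pvAcc PySem.Dict.empty).getD c.1 0 + c.2) from rfl]
      rw [PySem.Dict.items_insert_of_contains _ _ hcontT, hgd, ih, if_pos hm, List.map_map]
      refine List.map_congr_left (fun k hk => ?_)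
      have hkmem : k ∈ l.map (fun c => c.1) := (PySem.List.mem_dedup _ _).mp hk
      by_cases hkc : k = c.1
      · subst hkc
        simp [pv_S_append]
      · simp [hkc, pv_S_append, Ne.symm hkc]
    · -- fresh key appends
      have hcontF : (l.foldl pvAcc PySem.Dict.empty).contains c.1 = false := by
        rw [hcont]; simpa using hm
      rw [show pvAcc (l.foldl pvAcc PySem.Dict.empty) c
          = (l.foldl pvAcc PySem.Dict.empty).insert c.1
              ((l.foldl pvAcc PySem.Dict.empty).getD c.1 0 + c.2) from rfl]
      rw [PySem.Dict.items_insert_of_not_contains _ _ hcontF,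
        PySem.Dict.getD_of_not_contains _ _ hcontF, ih, if_neg hm, List.map_append]
      congr 1
      · refine List.map_congr_left (fun k hk => ?_)
        have hkmem : k ∈ l.map (fun c => c.1) := (PySem.List.mem_dedup _ _).mp hk
        have hkc : ¬ c.1 = k := fun h => hm (h ▸ hkmem)
        simp [pv_S_append, hkc]
      · simp [pv_S_append, pv_S_of_not_mem l c.1 hm]

-- ===== VERDICT (by name: the statement is the Claim_ definition above) =====
theorem create_true_table_spec : Claim_equal_create_true_table := by
  intro data _
  show create_true_table data = create_true_table_alt data
  show (PySem.List.sorted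
      (((PySem.Dict.ofList data).items.foldl pvStepA PySem.Dict.empty).items.foldl
        (fun m p => m.insert p.1 (p.2.1 * 3 + p.2.2.1)) PySem.Dict.empty).items
      (fun x => x.2) false).reverse
    = create_true_table_alt data
  have hnod : ((PySem.Dict.ofList data).items.foldl pvStepA PySem.Dict.empty).keys.Nodup :=
    pv_nodup _ _ (by simp)
  have h2 : (((PySem.Dict.ofList data).items.foldl pvStepA PySem.Dict.empty).items.foldl
        (fun m p => m.insert p.1 (p.2.1 * 3 + p.2.2.1)) PySem.Dict.empty).items
      = ((PySem.Dict.ofList data).items.foldl pvStepA PySem.Dict.empty).items.map pvPsi := by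
    have := PySem.Dict.items_foldl_insert_fresh
      (((PySem.Dict.ofList data).items.foldl pvStepA PySem.Dict.empty).items)
      (fun p => p.1) (fun p => p.2.1 * 3 + p.2.2.1) PySem.Dict.empty
      (by intro a _; simp) (by simpa [PySem.Dict.keys] using hnod)
    simpa [pvPsi, pvPhi] using this
  rw [h2, ← pv_loop _ PySem.Dict.empty PySem.Dict.empty rfl]
  -- rewrite the pvStepB fold as the pvAcc fold over the flat contribution list
  have hfold : (PySem.Dict.ofList data).items.foldl pvStepB PySem.Dict.empty
      = (((PySem.Dict.ofList data).items.map (fun p =>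
          (String.ofList (PySem.List.slice p.1.toList (some 8) none),
           pvScore p.1 p.2))).foldl pvAcc PySem.Dict.empty) := by
    have hfun : pvStepB = (fun (d : PySem.Dict String Int)
        (p : String × List (String × String)) =>
        pvAcc d (String.ofList (PySem.List.slice p.1.toList (some 8) none), pvScore p.1 p.2)) := by
      funext d p; exact pv_stepB_eq_acc d p
    rw [List.foldl_map, hfun]
  rw [hfold, pv_group]
  rfl
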